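-- pv_equiv track=rewrite | github.com/jenkinsjamesb/egre426 | assembler.py | format_program_text
-- ===== SOURCE A (Python) =====
-- def format_program_text(text):
--         ''' Formats program text to easily-parseable lines, and removes comments and whitespace'''
--         text_lines = text.split("\n")
--         trimmed_text = ""
--
--         for line in text_lines:
--                 line = line.split("#")[0] # Remove all text after a '#'
--                 line = line.strip() # Remove leading/trailing whitespace
--
--                 if line != "":
--                         # If the line is labeled, prepend the next line with it. Otherwise, add the line to the text.
--                         if line.endswith(":"):
--                                 trimmed_text += line + " "
--                         else:
--                                 trimmed_text += line + "\n"
--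
--         return trimmed_text[:-1] # Return the trimmed text without the trailing newline
-- ===== SOURCE B (Python) =====
-- def format_program_text(text):
--         ''' Formats program text to easily-parseable lines, and removes comments and whitespace'''
--         cleaned = [line for line in
--                    (raw.split("#")[0].strip() for raw in text.split("\n"))
--                    if line]
--         # Join all kept lines with newlines, then glue every label line onto its
--         # successor in one global replace pass: a kept line ends with a colon
--         # exactly when colon-newline appears at its boundary (kept lines
--         # themselves contain no newline).
--         return "\n".join(cleaned).replace(":\n", ": ")
-- ===== Notes on version B (the rewrite author's own statement) =====
-- stated objective: alternative
-- what changed: B replaces A's single-pass loop with per-line conditional separators (finished by chopping the last character) by staged passes: filter-map the cleaned lines, join them all with newlines, then merge every label into its successor with one global replace of colon-newline by colon-space.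
import Mathlib
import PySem

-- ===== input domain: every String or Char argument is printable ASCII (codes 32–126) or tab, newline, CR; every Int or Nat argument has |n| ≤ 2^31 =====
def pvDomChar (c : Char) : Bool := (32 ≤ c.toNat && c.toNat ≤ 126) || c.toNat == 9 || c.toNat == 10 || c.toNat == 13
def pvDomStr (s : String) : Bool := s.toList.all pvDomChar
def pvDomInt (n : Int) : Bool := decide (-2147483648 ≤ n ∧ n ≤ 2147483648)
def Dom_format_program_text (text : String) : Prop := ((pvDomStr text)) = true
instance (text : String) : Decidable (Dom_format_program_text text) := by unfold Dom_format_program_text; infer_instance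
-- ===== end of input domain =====

-- B replaces A's single-pass loop with conditional separators by staged passes:
-- filter-map cleaned lines, join with '\n', then merge labels with one global
-- replace of colon-newline by colon-space — alternative decomposition, same cost, same value.

-- ===== PORT A =====
-- line.split("#")[0].strip()  (this expression appears verbatim in both Pythons)
def pvClean (raw : List Char) : List Char :=
  PySem.Chars.strip ((PySem.Chars.splitOn raw ['#']).headD [])

-- one iteration of A's loop body on the accumulator string
def pvStepA (acc : List Char) (raw : List Char) : List Char :=
  let line := pvClean raw
  if line ≠ [] then
    if PySem.Chars.endswith line [':'] then acc ++ line ++ [' ']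
    else acc ++ line ++ ['\n']
  else acc

def format_program_text (text : String) : String :=
  let trimmed := (PySem.Chars.splitOn text.toList ['\n']).foldl pvStepA []
  String.ofList (PySem.Chars.slice trimmed none (some (-1)))   -- trimmed_text[:-1]

-- ===== PORT B =====
def format_program_text_alt (text : String) : String :=
  let cleaned := ((PySem.Chars.splitOn text.toList ['\n']).map pvClean).filter
    (fun l => !l.isEmpty)
  String.ofList (PySem.Chars.replace (PySem.Chars.join ['\n'] cleaned) [':', '\n'] [':', ' '])

-- ===== PRECONDITION & SPEC =====
def Spec_format_program_text (text : String) (out : String) : Prop := out = format_program_text_alt text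
instance (text : String) (out : String) : Decidable (Spec_format_program_text text out) := by unfold Spec_format_program_text; infer_instance

-- ===== CLAIM =====
def Claim_equal_format_program_text : Prop := ∀ (text : String), Dom_format_program_text text → Spec_format_program_text text (format_program_text text)

-- ===== LEMMAS AND PROOFS =====

-- what B's global replace (colon-newline by colon-space) computes, structurally
def pvRep : List Char → List Char
  | ':' :: '\n' :: t => ':' :: ' ' :: pvRep t
  | c :: t => c :: pvRep t
  | [] => []

lemma pvRep_cons (c : Char) (t : List Char)
    (h : c ≠ ':' ∨ t.head? ≠ some '\n') : pvRep (c :: t) = c :: pvRep t := by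
  rw [pvRep.eq_def]
  split
  · rename_i heq; injection heq with h1 h2; subst h1 h2; simp at h
  · rename_i heq; injection heq with h1 h2; subst h1 h2; rfl
  · rename_i heq; exact absurd heq (by simp)

lemma go_eq (fuel : Nat) (l acc : List Char) (hf : l.length ≤ fuel) :
    PySem.Chars.replace.go [':','\n'] [':',' '] fuel l acc = acc.reverse ++ pvRep l := by
  induction fuel generalizing l acc with
  | zero =>
    rw [PySem.Chars.replace.go.eq_def]
    simp at hf; simp [hf, pvRep]
  | succ n ih =>
    rw [PySem.Chars.replace.go.eq_def]
    cases l with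
    | nil => simp [pvRep]
    | cons c t =>
      by_cases hp : List.isPrefixOf [':','\n'] (c :: t) = true
      · simp only [hp, if_pos]
        obtain ⟨t', rfl, hc⟩ : ∃ t', t = '\n' :: t' ∧ c = ':' := by
          cases t with
          | nil => simp [List.isPrefixOf] at hp
          | cons d t' =>
            simp [List.isPrefixOf] at hp
            obtain ⟨h1, h2⟩ := hp
            exact ⟨t', by rw [h2], h1.symm⟩
        subst hc
        rw [ih _ _ (by simp at hf ⊢; omega)]
        simp [pvRep]
      · simp only [hp, if_neg, Bool.not_eq_true]
        rw [ih _ _ (by simp at hf; omega)]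
        have hcons : pvRep (c :: t) = c :: pvRep t := by
          apply pvRep_cons
          by_cases hc : c = ':'
          · subst hc
            right
            cases t with
            | nil => simp
            | cons d t' =>
              simp [List.isPrefixOf] at hp
              simp; intro hd; exact hp (by simp [hd])
          · exact Or.inl hc
        simp [hcons]

lemma replace_eq (s : List Char) :
    PySem.Chars.replace s [':','\n'] [':',' '] = pvRep s := by
  rw [PySem.Chars.replace]
  simp [go_eq s.length s [] le_rfl]

lemma pvRep_no_nl (l : List Char) (h : '\n' ∉ l) : pvRep l = l := by
  induction l with
  | nil => rfl
  | cons c t ih =>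
    rw [pvRep_cons c t]
    · simp at h; rw [ih h.2]
    · right
      cases t with
      | nil => simp
      | cons d t' => simp at h ⊢; exact fun hd => absurd hd.symm h.2.1

lemma pvRep_getLast (a : List Char) (h : a.getLast? = some ':') :
    a.dropLast ++ [':'] = a := by
  have := List.dropLast_append_getLast? (l := a) (a := ':') h
  simpa using this

lemma pvEndswith_colon (a : List Char) :
    PySem.Chars.endswith a [':'] = (a.getLast? == some ':') := by
  by_cases h : a.getLast? = some ':'
  · rw [h]
    simp only [beq_self_eq_true]
    rw [PySem.Chars.endswith_iff]
    exact ⟨a.dropLast, pvRep_getLast a h⟩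
  · rw [beq_eq_false_iff_ne.mpr h, ← Bool.not_eq_true, PySem.Chars.endswith_iff]
    rintro ⟨p, hp⟩
    exact h (by rw [← hp]; simp)

lemma pvRep_boundary (a rest : List Char) (h : '\n' ∉ a) :
    pvRep (a ++ '\n' :: rest)
      = (if PySem.Chars.endswith a [':'] then a.dropLast ++ [':', ' '] else a ++ ['\n'])
        ++ pvRep rest := by
  induction a with
  | nil =>
    simp only [List.nil_append]
    rw [pvRep_cons '\n' rest (Or.inl (by decide))]
    simp [pvEndswith_colon]
  | cons c t ih =>
    simp only [List.mem_cons, not_or] at h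
    cases t with
    | nil =>
      by_cases hc : c = ':'
      · subst hc; simp [pvRep, pvEndswith_colon]
      · simp only [List.cons_append, List.nil_append]
        rw [pvRep_cons c ('\n' :: rest) (Or.inl hc),
            pvRep_cons '\n' rest (Or.inl (by decide))]
        simp [pvEndswith_colon, hc]
    | cons d t' =>
      have hd : d ≠ '\n' := by
        have := h.2; simp at this; exact fun x => this.1 x.symm |>.elim
      have hstep : pvRep (c :: (d :: t' ++ '\n' :: rest))
          = c :: pvRep (d :: t' ++ '\n' :: rest) := by
        apply pvRep_cons
        right; simp only [List.cons_append, List.head?_cons, ne_eq, Option.some.injEq]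
        exact fun x => hd x
      rw [List.cons_append, hstep, ih h.2]
      have hlast : (c :: d :: t').getLast? = (d :: t').getLast? := by simp
      rw [pvEndswith_colon, pvEndswith_colon, hlast]
      by_cases he : (d :: t').getLast? = some ':' <;> simp [he]

-- parts of splitOn s [sc] never contain sc
lemma pvSplit_go_sep (sc : Char) (fuel : Nat) (l cur : List Char) (acc : List (List Char))
    (hf : l.length ≤ fuel) (hcur : sc ∉ cur) (hacc : ∀ p ∈ acc, sc ∉ p) :
    ∀ p ∈ PySem.Chars.splitOn.go [sc] fuel l cur acc, sc ∉ p := by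
  induction fuel generalizing l cur acc with
  | zero =>
    rw [PySem.Chars.splitOn.go.eq_def]
    simp at hf
    subst hf
    intro p hp
    simp at hp
    rcases hp with hp | hp
    · exact hacc p hp
    · subst hp; simpa using hcur
  | succ n ih =>
    rw [PySem.Chars.splitOn.go.eq_def]
    cases l with
    | nil =>
      intro p hp; simp at hp
      rcases hp with hp | hp
      · exact hacc p hp
      · subst hp; simpa using hcur
    | cons c t =>
      by_cases hp : List.isPrefixOf [sc] (c :: t) = true
      · simp only [hp, if_pos]
        apply ih _ _ _ (by simp at hf ⊢; omega) (by simp)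
        intro p hmem
        rcases List.mem_cons.mp hmem with hp2 | hp2
        · subst hp2; simpa using hcur
        · exact hacc p hp2
      · simp only [hp, if_neg, Bool.not_eq_true]
        have hc : c ≠ sc := by simp [List.isPrefixOf] at hp; exact fun x => hp x.symm
        exact ih t (c :: cur) acc (by simp at hf; omega) (by simp [hcur]; exact fun x => hc x.symm) hacc

lemma pvSplit_sep (sc : Char) (s : List Char) :
    ∀ p ∈ PySem.Chars.splitOn s [sc], sc ∉ p := by
  rw [PySem.Chars.splitOn]
  exact pvSplit_go_sep sc (s.length + 1) s [] [] (by omega) (by simp) (by simp)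

-- a char absent from the input is absent from every part, any separator
lemma pvSplit_go_absent (x : Char) (sep : List Char) (fuel : Nat) (l cur : List Char)
    (acc : List (List Char)) (hl : x ∉ l) (hcur : x ∉ cur) (hacc : ∀ p ∈ acc, x ∉ p) :
    ∀ p ∈ PySem.Chars.splitOn.go sep fuel l cur acc, x ∉ p := by
  induction fuel generalizing l cur acc with
  | zero =>
    rw [PySem.Chars.splitOn.go.eq_def]
    intro p hp; simp at hp
    rcases hp with hp | hp
    · exact hacc p hp
    · subst hp; simp; exact ⟨by simpa using hcur, hl⟩
  | succ n ih =>
    rw [PySem.Chars.splitOn.go.eq_def]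
    cases l with
    | nil =>
      intro p hp; simp at hp
      rcases hp with hp | hp
      · exact hacc p hp
      · subst hp; simpa using hcur
    | cons c t =>
      simp only [List.mem_cons, not_or] at hl
      by_cases hp : List.isPrefixOf sep (c :: t) = true
      · simp only [hp, if_pos]
        apply ih _ _ _ (by
          intro hmem
          exact absurd (List.mem_of_mem_drop hmem) (by simp; exact ⟨hl.1, hl.2⟩)) (by simp)
        intro p hmem
        rcases List.mem_cons.mp hmem with hp2 | hp2
        · subst hp2; simpa using hcur
        · exact hacc p hp2
      · simp only [hp, if_neg, Bool.not_eq_true]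
        exact ih t (c :: cur) acc hl.2 (by simp [hcur]; exact fun e => hl.1 e) hacc

lemma pvStrip_absent (x : Char) (s : List Char) (h : x ∉ s) :
    x ∉ PySem.Chars.strip s := by
  intro hmem
  apply h
  rw [PySem.Chars.strip, PySem.Chars.rstrip, PySem.Chars.lstrip] at hmem
  have h1 : x ∈ (List.dropWhile PySem.Chars.isspace (List.dropWhile PySem.Chars.isspace s).reverse) := by
    simpa using hmem
  have h2 := (List.dropWhile_sublist _).mem h1
  rw [List.mem_reverse] at h2
  exact (List.dropWhile_sublist _).mem h2

-- A's accumulated string, as a function of the kept cleaned lines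
def pvS (rs : List (List Char)) : List Char :=
  (rs.map (fun l => l ++ [if PySem.Chars.endswith l [':'] then ' ' else '\n'])).flatten

lemma pvFoldA (raws : List (List Char)) (acc : List Char) :
    raws.foldl pvStepA acc = acc ++ pvS ((raws.map pvClean).filter (fun l => !l.isEmpty)) := by
  induction raws generalizing acc with
  | nil => simp [pvS]
  | cons a t ih =>
    rw [List.foldl_cons, ih]
    by_cases ha : pvClean a = []
    · simp [pvStepA, ha, pvS]
    · by_cases he : PySem.Chars.endswith (pvClean a) [':'] = true <;>
        simp [pvStepA, ha, he, pvS]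

lemma pvSplit_absent (x : Char) (s sep : List Char) (h : x ∉ s) :
    ∀ p ∈ PySem.Chars.splitOn s sep, x ∉ p := by
  rw [PySem.Chars.splitOn]
  exact pvSplit_go_absent x sep (s.length + 1) s [] [] h (by simp) (by simp)

lemma pvClean_no_nl (raw : List Char) (h : '\n' ∉ raw) : '\n' ∉ pvClean raw := by
  apply pvStrip_absent
  cases hsp : PySem.Chars.splitOn raw ['#'] with
  | nil => simp
  | cons a l =>
    have := pvSplit_absent '\n' raw ['#'] h a (by rw [hsp]; exact List.mem_cons_self ..)
    simpa using this

lemma pvRep_join (rs : List (List Char)) (h : ∀ p ∈ rs, '\n' ∉ p) :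
    pvRep (PySem.Chars.join ['\n'] rs) = (pvS rs).dropLast := by
  induction rs with
  | nil => simp [PySem.Chars.join_nil, pvS, pvRep]
  | cons a t ih =>
    cases t with
    | nil =>
      rw [PySem.Chars.join_singleton, pvRep_no_nl a (h a (by simp))]
      simp [pvS]
    | cons b u =>
      rw [PySem.Chars.join_cons_cons]
      have hb : pvRep (a ++ '\n' :: PySem.Chars.join ['\n'] (b :: u))
          = (if PySem.Chars.endswith a [':'] then a.dropLast ++ [':', ' '] else a ++ ['\n'])
            ++ pvRep (PySem.Chars.join ['\n'] (b :: u)) := pvRep_boundary _ _ (h a (by simp))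
      rw [show a ++ ['\n'] ++ PySem.Chars.join ['\n'] (b :: u)
            = a ++ '\n' :: PySem.Chars.join ['\n'] (b :: u) by simp, hb,
          ih (fun p hp => h p (List.mem_cons_of_mem a hp))]
      have hne : pvS (b :: u) ≠ [] := by simp [pvS]
      rw [show pvS (a :: b :: u)
            = (a ++ [if PySem.Chars.endswith a [':'] then ' ' else '\n']) ++ pvS (b :: u) by
          simp [pvS],
        List.dropLast_append_of_ne_nil hne]
      by_cases he : PySem.Chars.endswith a [':'] = true
      · have hlast : a.getLast? = some ':' := by
          rw [pvEndswith_colon] at he; simpa using he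
        simp only [if_pos he]
        conv_rhs => rw [← pvRep_getLast a hlast]
        simp
      · simp only [if_neg he]

-- ===== VERDICT =====
theorem format_program_text_spec : Claim_equal_format_program_text := by
  intro text _
  unfold Spec_format_program_text format_program_text format_program_text_alt
  have hsl : ∀ cs : List Char, PySem.Chars.slice cs none (some (-1)) = cs.dropLast := by
    intro cs; simp [pysem]
  simp only [hsl]
  have hnl : ∀ p ∈ ((PySem.Chars.splitOn text.toList ['\n']).map pvClean).filter
      (fun l => !l.isEmpty), '\n' ∉ p := by
    intro p hp
    simp only [List.mem_filter, List.mem_map] at hp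
    obtain ⟨⟨raw, hraw, rfl⟩, -⟩ := hp
    exact pvClean_no_nl raw (pvSplit_sep '\n' text.toList raw hraw)
  rw [pvFoldA, replace_eq, pvRep_join _ hnl]
  simp
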